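-- pv_equiv track=rewrite | github.com/yakunitatta-senko/Poketwo-Helper | bot/utils/cogs/pokemon.py | reverse_transform_name
-- ===== SOURCE A (Python) =====
-- def reverse_transform_name(name):
--  rev_map = {"-alola": "Alolan", "-galar": "Galarian", "-hisui": "Hisuian", "-paldea": "Paldean", "-mega": "Mega"}
--  n = name.lower()
--  for suf, pre in rev_map.items():
--     if n.endswith(suf):
--         base = name[:-len(suf)]
--         return f"{pre} {base}", pre
--  return name, ''
-- ===== SOURCE B (Python) =====
-- def reverse_transform_name(name):
--     SUF = {"alola": "Alolan", "galar": "Galarian", "hisui": "Hisuian",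
--            "paldea": "Paldean", "mega": "Mega"}
--     head, sep, tail = name.rpartition("-")
--     if not sep:
--         return name, ""
--     pre = SUF.get(tail.lower())
--     if pre is None:
--         return name, ""
--     return f"{pre} {head}", pre
-- ===== Notes on version B (the rewrite author's own statement) =====
-- stated objective: idiomatic
-- what changed: Replaces the loop that tests every suffix with endswith on the lowered name by a single rpartition at the last dash followed by one dict lookup keyed on the bare lowered tail.
import Mathlib
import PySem

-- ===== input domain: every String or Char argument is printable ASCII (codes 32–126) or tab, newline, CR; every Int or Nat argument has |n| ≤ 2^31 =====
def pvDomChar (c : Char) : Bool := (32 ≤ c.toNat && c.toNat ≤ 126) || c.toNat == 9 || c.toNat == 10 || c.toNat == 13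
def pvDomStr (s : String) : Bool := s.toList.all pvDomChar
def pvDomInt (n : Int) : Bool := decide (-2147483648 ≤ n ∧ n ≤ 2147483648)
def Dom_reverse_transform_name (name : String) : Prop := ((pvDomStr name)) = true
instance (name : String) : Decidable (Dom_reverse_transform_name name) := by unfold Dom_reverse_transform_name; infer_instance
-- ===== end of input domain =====

-- B replaces A's scan over all five '-suffix' endswith tests by one rpartition at the
-- last dash plus a single lookup keyed on the bare lowered tail (idiomatic rewrite).

-- ===== PORT A =====
-- Strings are handled on the `List Char` side (PySem.Chars), wrapped back with
-- String.ofList; string literals appear as their character lists.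

-- the dict literal rev_map, in insertion order (items of the dict)
def pvRevMap : List (List Char × List Char) :=
  [(['-','a','l','o','l','a'], ['A','l','o','l','a','n']),
   (['-','g','a','l','a','r'], ['G','a','l','a','r','i','a','n']),
   (['-','h','i','s','u','i'], ['H','i','s','u','i','a','n']),
   (['-','p','a','l','d','e','a'], ['P','a','l','d','e','a','n']),
   (['-','m','e','g','a'], ['M','e','g','a'])]

-- the for-loop with early return: f"{pre} {base}" is pre ++ ' ' :: base,
-- base = name[:-len(suf)] is PySem.Chars.slice name none (some (-(len suf)))
def pvALoop (name n : List Char) : List (List Char × List Char) → List Char × List Char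
  | [] => (name, [])
  | (suf, pre) :: rest =>
    if PySem.Chars.endswith n suf then
      (pre ++ ' ' :: PySem.Chars.slice name none (some (-(suf.length : Int))), pre)
    else pvALoop name n rest

def reverse_transform_name (name : String) : String × String :=
  let r := pvALoop name.toList (PySem.Chars.lower name.toList) pvRevMap
  (String.ofList r.1, String.ofList r.2)

-- ===== PORT B =====
-- the dict literal SUF, keyed on the bare suffix word
def pvSufMap : PySem.Dict (List Char) (List Char) :=
  ⟨[(['a','l','o','l','a'], ['A','l','o','l','a','n']),
    (['g','a','l','a','r'], ['G','a','l','a','r','i','a','n']),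
    (['h','i','s','u','i'], ['H','i','s','u','i','a','n']),
    (['p','a','l','d','e','a'], ['P','a','l','d','e','a','n']),
    (['m','e','g','a'], ['M','e','g','a'])]⟩

-- hand port of name.rpartition('-') (PySem has no rpartition): scan the reversed
-- characters for the first dash; returns (head, tail) of the split at the LAST
-- dash of the original string, or none when there is no dash (empty sep in Python)
def pvRPartGo (acc : List Char) : List Char → Option (List Char × List Char)
  | [] => none
  | c :: rest => if c = '-' then some (rest.reverse, acc) else pvRPartGo (c :: acc) rest

def pvBInner (l : List Char) : List Char × List Char :=
  match pvRPartGo [] l.reverse with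
  | none => (l, [])                                  -- not sep: return name, ''
  | some (head, tail) =>
    match PySem.Dict.get? pvSufMap (PySem.Chars.lower tail) with
    | some pre => (pre ++ ' ' :: head, pre)          -- f"{pre} {head}", pre
    | none => (l, [])                                -- pre is None: return name, ''

def reverse_transform_name_alt (name : String) : String × String :=
  let r := pvBInner name.toList
  (String.ofList r.1, String.ofList r.2)

-- ===== PRECONDITION & SPEC =====
def Spec_reverse_transform_name (name : String) (out : String × String) : Prop := out = reverse_transform_name_alt name
instance (name : String) (out : String × String) : Decidable (Spec_reverse_transform_name name out) := by unfold Spec_reverse_transform_name; infer_instance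

-- ===== CLAIM (what is proved, stated in full; the proofs are below) =====
def Claim_equal_reverse_transform_name : Prop := ∀ (name : String), Dom_reverse_transform_name name → Spec_reverse_transform_name name (reverse_transform_name name)

-- ===== LEMMAS AND PROOFS =====

theorem pvLowerChar_eq_dash {c : Char} (h : PySem.Chars.lowerChar c = '-') : c = '-' := by
  unfold PySem.Chars.lowerChar at h
  split at h
  · rename_i hu
    simp only [PySem.Chars.isupper, Bool.and_eq_true, decide_eq_true_eq] at hu
    have h65 : 65 ≤ c.toNat := Nat.succ_le_of_lt hu.1
    have h2 := congrArg Char.toNat h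
    rw [Char.toNat_ofNat] at h2
    have hv : (c.toNat + 32).isValidChar := by
      unfold Nat.isValidChar
      left
      have := hu.2
      rw [Char.le_def] at this
      have h90 : c.toNat ≤ 90 :=
        Nat.le_of_lt_succ (Nat.lt_of_lt_of_le (Nat.lt_succ_of_le (UInt32.le_iff_toNat_le.mp this)) (by decide))
      omega
    simp only [hv, if_true] at h2
    have hd : ('-').toNat = 45 := by decide
    omega
  · exact h

theorem pvDash_mem_of_mem_lower {l : List Char} (h : '-' ∈ PySem.Chars.lower l) : '-' ∈ l := by
  unfold PySem.Chars.lower at h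
  obtain ⟨c, hc, he⟩ := List.mem_map.mp h
  exact (pvLowerChar_eq_dash he) ▸ hc

theorem pvRPartGo_none : ∀ (r acc : List Char), pvRPartGo acc r = none → '-' ∉ r := by
  intro r
  induction r with
  | nil => intro acc _ h; simp at h
  | cons c rest ih =>
    intro acc hg hm
    unfold pvRPartGo at hg
    by_cases hc : c = '-'
    · simp [hc] at hg
    · simp [hc] at hg
      rcases List.mem_cons.mp hm with h | h
      · exact hc h.symm
      · exact ih _ hg h

theorem pvRPartGo_some : ∀ (r acc h t : List Char), pvRPartGo acc r = some (h, t) →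
    ∃ r1 r2, r = r1 ++ '-' :: r2 ∧ '-' ∉ r1 ∧ h = r2.reverse ∧ t = r1.reverse ++ acc := by
  intro r
  induction r with
  | nil => intro acc h t hg; simp [pvRPartGo] at hg
  | cons c rest ih =>
    intro acc h t hg
    unfold pvRPartGo at hg
    by_cases hc : c = '-'
    · simp [hc] at hg
      exact ⟨[], rest, by simp [hc], by simp, hg.1.symm, by simp [hg.2]⟩
    · simp [hc] at hg
      obtain ⟨r1, r2, hr, hn, hh, ht⟩ := ih _ _ _ hg
      exact ⟨c :: r1, r2, by simp [hr], by
        intro hm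
        rcases List.mem_cons.mp hm with h' | h'
        · exact hc h'.symm
        · exact hn h', hh, by simp [ht]⟩

-- lower distributes over the last-dash decomposition
theorem pvLower_decomp (h t : List Char) :
    PySem.Chars.lower (h ++ '-' :: t) = PySem.Chars.lower h ++ '-' :: PySem.Chars.lower t := by
  simp [PySem.Chars.lower, PySem.Chars.lowerChar, PySem.Chars.isupper]

-- the dash-free segment after the last dash is unique
theorem pvLast_dash_unique : ∀ (a b t1 t2 : List Char), a ++ '-' :: t1 = b ++ '-' :: t2 →
    '-' ∉ t1 → '-' ∉ t2 → t1 = t2 := by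
  intro a b t1 t2 he h1 h2
  have s1 : ('-' :: t1) <:+ (a ++ '-' :: t1) := ⟨a, rfl⟩
  have s2 : ('-' :: t2) <:+ (a ++ '-' :: t1) := he ▸ ⟨b, rfl⟩
  rcases List.suffix_or_suffix_of_suffix s1 s2 with hs | hs
  · rcases List.suffix_cons_iff.mp hs with h' | h'
    · exact (List.cons.inj h').2
    · exact absurd (h'.subset List.mem_cons_self) h2
  · rcases List.suffix_cons_iff.mp hs with h' | h'
    · exact ((List.cons.inj h').2).symm
    · exact absurd (h'.subset List.mem_cons_self) h1

-- the workhorse: with l split at its last dash, each endswith test of A is exactly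
-- the equality test B's dict lookup performs on the lowered tail
theorem pvEndswith_eq (l h t : List Char) (hl : l = h ++ '-' :: t) (hnt : '-' ∉ t)
    (w : List Char) (hw : '-' ∉ w) :
    PySem.Chars.endswith (PySem.Chars.lower l) ('-' :: w) = (PySem.Chars.lower t == w) := by
  have hnlt : '-' ∉ PySem.Chars.lower t := fun hm => hnt (pvDash_mem_of_mem_lower hm)
  rw [Bool.eq_iff_iff, beq_iff_eq, PySem.Chars.endswith_iff]
  subst hl
  rw [pvLower_decomp]
  constructor
  · rintro ⟨u, hu⟩
    exact (pvLast_dash_unique u _ _ _ hu hw hnlt).symm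
  · intro he
    exact he ▸ ⟨PySem.Chars.lower h, rfl⟩

theorem pvEndswith_no_dash (l : List Char) (hl : '-' ∉ l) (w : List Char) :
    PySem.Chars.endswith (PySem.Chars.lower l) ('-' :: w) = false := by
  rw [Bool.eq_false_iff]
  intro he
  rcases (PySem.Chars.endswith_iff _ _).mp he with ⟨u, hu⟩
  exact hl (pvDash_mem_of_mem_lower (hu ▸ List.mem_append.mpr (Or.inr List.mem_cons_self)))

theorem pvInner_eq (l : List Char) :
    pvALoop l (PySem.Chars.lower l) pvRevMap = pvBInner l := by
  unfold pvBInner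
  cases hgo : pvRPartGo [] l.reverse with
  | none =>
    have hnd : '-' ∉ l := fun hm => pvRPartGo_none _ _ hgo (List.mem_reverse.mpr hm)
    simp [pvALoop, pvRevMap, pvEndswith_no_dash l hnd]
  | some p =>
    obtain ⟨h, t⟩ := p
    obtain ⟨r1, r2, hr, hn1, hh, ht⟩ := pvRPartGo_some _ _ _ _ hgo
    have hl : l = h ++ '-' :: t := by
      have := congrArg List.reverse hr
      simp at this
      rw [this, hh, ht]
      simp
    have hnt : '-' ∉ t := by
      rw [ht]
      simp
      exact fun hm => hn1 (List.mem_reverse.mp (by simpa using hm))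
    have e := pvEndswith_eq l h t hl hnt
    have e1 := e ['a','l','o','l','a'] (by decide)
    have e2 := e ['g','a','l','a','r'] (by decide)
    have e3 := e ['h','i','s','u','i'] (by decide)
    have e4 := e ['p','a','l','d','e','a'] (by decide)
    have e5 := e ['m','e','g','a'] (by decide)
    have hbase : ∀ (k : Nat), 1 < k → t.length + 1 = k →
        PySem.List.slice l none (some (-(OfNat.ofNat k : Int))) = h := by
      intro k hk1 hk
      rw [PySem.List.slice_to_neg_ofNat l k hk1, hl]
      have hln2 : (h ++ '-' :: t).length - k = h.length := by simp; omega
      rw [hln2, List.take_left]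
    by_cases h1 : PySem.Chars.lower t = ['a','l','o','l','a']
    · have hln : t.length = 5 := by
        have := congrArg List.length h1
        simpa [PySem.Chars.lower] using this
      simp [pvALoop, pvRevMap, e1, h1, PySem.Dict.get?, pvSufMap,
        hbase 6 (by omega) (by omega)]
    by_cases h2 : PySem.Chars.lower t = ['g','a','l','a','r']
    · have hln : t.length = 5 := by
        have := congrArg List.length h2
        simpa [PySem.Chars.lower] using this
      simp [pvALoop, pvRevMap, e1, e2, h2, PySem.Dict.get?, pvSufMap,
        hbase 6 (by omega) (by omega)]
    by_cases h3 : PySem.Chars.lower t = ['h','i','s','u','i']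
    · have hln : t.length = 5 := by
        have := congrArg List.length h3
        simpa [PySem.Chars.lower] using this
      simp [pvALoop, pvRevMap, e1, e2, e3, h3, PySem.Dict.get?, pvSufMap,
        hbase 6 (by omega) (by omega)]
    by_cases h4 : PySem.Chars.lower t = ['p','a','l','d','e','a']
    · have hln : t.length = 6 := by
        have := congrArg List.length h4
        simpa [PySem.Chars.lower] using this
      simp [pvALoop, pvRevMap, e1, e2, e3, e4, h4, PySem.Dict.get?, pvSufMap,
        hbase 7 (by omega) (by omega)]
    by_cases h5 : PySem.Chars.lower t = ['m','e','g','a']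
    · have hln : t.length = 4 := by
        have := congrArg List.length h5
        simpa [PySem.Chars.lower] using this
      simp [pvALoop, pvRevMap, e1, e2, e3, e4, e5, h5, PySem.Dict.get?, pvSufMap,
        hbase 5 (by omega) (by omega)]
    · have b1 : (['a','l','o','l','a'] == PySem.Chars.lower t) = false :=
        beq_eq_false_iff_ne.mpr (fun hh => h1 hh.symm)
      have b2 : (['g','a','l','a','r'] == PySem.Chars.lower t) = false :=
        beq_eq_false_iff_ne.mpr (fun hh => h2 hh.symm)
      have b3 : (['h','i','s','u','i'] == PySem.Chars.lower t) = false :=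
        beq_eq_false_iff_ne.mpr (fun hh => h3 hh.symm)
      have b4 : (['p','a','l','d','e','a'] == PySem.Chars.lower t) = false :=
        beq_eq_false_iff_ne.mpr (fun hh => h4 hh.symm)
      have b5 : (['m','e','g','a'] == PySem.Chars.lower t) = false :=
        beq_eq_false_iff_ne.mpr (fun hh => h5 hh.symm)
      simp [pvALoop, pvRevMap, e1, e2, e3, e4, e5, h1, h2, h3, h4, h5, PySem.Dict.get?, pvSufMap,
        List.find?, b1, b2, b3, b4, b5]

-- ===== VERDICT (by name: the statement is the Claim_ definition above) =====
theorem reverse_transform_name_spec : Claim_equal_reverse_transform_name := by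
  intro name _
  unfold Spec_reverse_transform_name reverse_transform_name reverse_transform_name_alt
  rw [pvInner_eq]
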